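-- pv_equiv track=rewrite | github.com/phasegenomics/proxiphage_paper | misc_scripts/validate_viral_bins.py | tally_contig_hits
-- ===== SOURCE A (Python) =====
-- def tally_contig_hits(contigs, hits):
--     """
--     Summarize the blast hits of contigs in a cluster
--     Args:
--         contigs (dict[str:str]): contigs in a cluster
--         hits (dict[str:dict[str:tuple]]): blast hits of short-read contigs to long-read contigs
--     Returns:
--         ont_hits (set): long-read contigs hit by the shot-read contig
--         aligned_contigs (int): number of contigs that were aligned to the long-read contigs
--         max_support (int): maximum number of short-read contigs aligned to a single long-read contig
--
--     """
--     ont_hits = set()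
--     supports = dict()
--     aligned_contigs = 0
--     for contig in contigs:
--         if contig in hits:
--             aligned_contigs += 1
--             ont_hits = ont_hits.union(set(hits[contig].keys()))
--             for subcontig in hits[contig]:
--                 if subcontig not in supports:
--                     supports[subcontig] = 1
--                 else:
--                     supports[subcontig] += 1
--     if len(supports) >= 1:
--         max_support = max(supports.values())
--     else:
--         max_support = 0
--     return ont_hits, aligned_contigs, max_support
-- ===== SOURCE B (Python) =====
-- def _longest_run(ts):
--     """Length of the longest block of equal adjacent elements in a sorted list."""
--     best = 0
--     run = 0
--     prev = None
--     for t in ts: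
--         run = run + 1 if t == prev else 1
--         if run > best:
--             best = run
--         prev = t
--     return best
--
--
-- def tally_contig_hits(contigs, hits):
--     aligned_contigs = 0
--     all_targets = []
--     for contig in contigs:
--         if contig in hits:
--             aligned_contigs += 1
--             all_targets.extend(hits[contig].keys())
--     return set(all_targets), aligned_contigs, _longest_run(sorted(all_targets))
-- ===== Notes on version B (the rewrite author's own statement) =====
-- stated objective: alternative
-- what changed: Replaces A's interleaved single pass (incremental set union plus a hand-rolled counting dict, guarded max over its values) with a gather-then-sort-then-scan: collect all hit targets into one flat list, and compute max_support as the longest run of equal adjacent elements in the sorted flat list, with no counting dict at all.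
import Mathlib
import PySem

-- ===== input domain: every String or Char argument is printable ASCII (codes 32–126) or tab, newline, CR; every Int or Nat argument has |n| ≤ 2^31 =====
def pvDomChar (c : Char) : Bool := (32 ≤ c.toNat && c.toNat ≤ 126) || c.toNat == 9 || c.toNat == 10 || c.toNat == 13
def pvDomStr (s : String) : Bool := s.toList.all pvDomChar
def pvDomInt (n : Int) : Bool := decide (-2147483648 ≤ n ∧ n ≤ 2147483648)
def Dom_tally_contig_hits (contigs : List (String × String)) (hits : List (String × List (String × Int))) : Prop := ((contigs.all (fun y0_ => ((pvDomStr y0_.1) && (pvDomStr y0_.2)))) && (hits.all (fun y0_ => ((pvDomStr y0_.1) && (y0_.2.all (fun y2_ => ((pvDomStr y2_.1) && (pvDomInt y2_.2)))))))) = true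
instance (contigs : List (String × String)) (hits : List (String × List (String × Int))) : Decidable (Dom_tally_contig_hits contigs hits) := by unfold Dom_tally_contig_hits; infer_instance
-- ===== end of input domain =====

-- B replaces A's interleaved pass (incremental set union + hand-rolled counting dict + guarded max)
-- by a different algorithm: gather all hit targets into one flat list, then get max_support as the
-- longest run of equal adjacent elements in the SORTED flat list (sort-and-scan, no counting dict).

-- ===== PORT A =====
def tally_contig_hits (contigs : List (String × String)) (hits : List (String × List (String × Int))) : List String × Int × Int :=
  -- ont_hits = set(); supports = dict(); aligned_contigs = 0; for contig in contigs: …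
  let H : PySem.Dict String (List (String × Int)) := PySem.Dict.mk hits
  let st : PySem.Set String × PySem.Dict String Int × Int :=
    contigs.foldl (fun st c =>
      match H.get? c.1 with
      | none => st
      | some d =>
        let ks := (PySem.Dict.mk d).keys
        let ont := PySem.Set.union st.1 (PySem.Set.ofList ks)
        let sup := ks.foldl (fun sup s =>
          match PySem.Dict.get? sup s with
          | none => PySem.Dict.insert sup s (1 : Int)
          | some v => PySem.Dict.insert sup s (v + 1)) st.2.1
        (ont, sup, st.2.2 + 1)) (PySem.Set.empty, PySem.Dict.empty, 0)
  let max_support : Int :=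
    if 1 ≤ (PySem.Dict.size st.2.1) then
      (PySem.List.max? (PySem.Dict.values st.2.1) (fun x => x)).getD 0
    else 0
  (st.1, st.2.2, max_support)

-- ===== PORT B =====
-- the scan of _longest_run: state (best, run, prev)
def pvRStep (st : Int × Int × Option String) (t : String) : Int × Int × Option String :=
  let run : Int := if st.2.2 == some t then st.2.1 + 1 else 1
  (if st.1 < run then run else st.1, run, some t)

def pvLongestRun (ts : List String) : Int :=
  (ts.foldl pvRStep ((0 : Int), (0 : Int), (none : Option String))).1

def tally_contig_hits_alt (contigs : List (String × String)) (hits : List (String × List (String × Int))) : List String × Int × Int :=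
  let H : PySem.Dict String (List (String × Int)) := PySem.Dict.mk hits
  let st : Int × List String :=
    contigs.foldl (fun st c =>
      match H.get? c.1 with
      | none => st
      | some d => (st.1 + 1, st.2 ++ (PySem.Dict.mk d).keys)) ((0 : Int), ([] : List String))
  (PySem.Set.ofList st.2, st.1, pvLongestRun (PySem.List.sorted st.2 (fun x => x) false))

-- ===== PRECONDITION & SPEC =====
def Spec_tally_contig_hits (contigs : List (String × String)) (hits : List (String × List (String × Int))) (out : List String × Int × Int) : Prop := out = tally_contig_hits_alt contigs hits
instance (contigs : List (String × String)) (hits : List (String × List (String × Int))) (out : List String × Int × Int) : Decidable (Spec_tally_contig_hits contigs hits out) := by unfold Spec_tally_contig_hits; infer_instance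

-- ===== CLAIM =====
def Claim_equal_tally_contig_hits : Prop := ∀ (contigs : List (String × String)) (hits : List (String × List (String × Int))), Dom_tally_contig_hits contigs hits → Spec_tally_contig_hits contigs hits (tally_contig_hits contigs hits)

-- ===== LEMMAS AND PROOFS =====

-- the insert-or-increment step of A's supports loop (proof-only helper)
def pvCStep (sup : PySem.Dict String Int) (x : String) : PySem.Dict String Int :=
  PySem.Dict.insert sup x (PySem.Dict.getD sup x 0 + 1)

-- A's inner supports loop is the counter step
theorem pv_inner_counter (ks : List String) (sup : PySem.Dict String Int) :
    ks.foldl (fun sup s =>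
      match PySem.Dict.get? sup s with
      | none => PySem.Dict.insert sup s (1 : Int)
      | some v => PySem.Dict.insert sup s (v + 1)) sup
    = ks.foldl pvCStep sup := by
  apply PySem.List.foldl_congr_mem
  intro acc s _
  cases h : PySem.Dict.get? acc s with
  | none => simp [pvCStep, PySem.Dict.getD_eq_get?_getD, h]
  | some v => simp [pvCStep, PySem.Dict.getD_eq_get?_getD, h]

-- s.union(set(ks)) = s.update(ks)
theorem pv_union_ofList (s : PySem.Set String) (ks : List String) :
    PySem.Set.union s (PySem.Set.ofList ks) = PySem.Set.update s ks := by
  show PySem.Set.update s (PySem.Set.ofList ks) = PySem.Set.update s ks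
  rw [PySem.Set.update_eq_append_filter, PySem.Set.update_eq_append_filter,
    PySem.Set.ofList_ofList]

-- repeated update is one update by the flattened list
theorem pv_foldl_update {α : Type} (g : α → List String) :
    ∀ (l : List α) (s : PySem.Set String),
    l.foldl (fun s c => PySem.Set.update s (g c)) s = PySem.Set.update s (l.flatMap g) := by
  intro l
  induction l with
  | nil => intro s; simp [PySem.Set.update]
  | cons c t ih =>
    intro s
    simp only [List.foldl_cons, List.flatMap_cons, PySem.Set.update_append]
    exact ih _

-- a nested fold over chunks is a fold of the flattened list
theorem pv_foldl_flat {α β δ : Type} (g : α → List β) (f : δ → β → δ) :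
    ∀ (l : List α) (d : δ),
    l.foldl (fun acc c => (g c).foldl f acc) d = (l.flatMap g).foldl f d := by
  intro l
  induction l with
  | nil => intro d; rfl
  | cons c t ih =>
    intro d
    simp only [List.foldl_cons, List.flatMap_cons, List.foldl_append]
    exact ih _

-- the aligned_contigs accumulator counts the list
theorem pv_foldl_len {α : Type} :
    ∀ (l : List α) (n : Int), l.foldl (fun m (_ : α) => m + 1) n = n + l.length := by
  intro l
  induction l with
  | nil => intro n; simp
  | cons c t ih => intro n; simp only [List.foldl_cons, List.length_cons, ih]; push_cast; ring

-- values of the counter dict of l, in key order, are the counts of the distinct elements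
theorem pv_values_counter (l : List String) :
    PySem.Dict.values (PySem.Dict.counter l)
      = (PySem.Set.ofList l).map (fun t => (l.count t : Int)) := by
  simp [PySem.Dict.values, PySem.Dict.items_counter, List.map_map, Function.comp_def]

-- invariant of the longest-run scan over a sorted list
theorem pv_run_spec : ∀ (s : List String), s.Pairwise (· ≤ ·) →
    ∀ (B run : Int) (p : Option String), run ≤ B →
    (∀ a, p = some a → ∀ x ∈ s, a ≤ x) →
    B ≤ (s.foldl pvRStep (B, run, p)).1 ∧
    (∀ t ∈ s, (if p = some t then run else 0) + (s.count t : Int) ≤ (s.foldl pvRStep (B, run, p)).1) ∧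
    ((s.foldl pvRStep (B, run, p)).1 = B ∨
      ∃ t ∈ s, (s.foldl pvRStep (B, run, p)).1 = (if p = some t then run else 0) + (s.count t : Int)) := by
  intro s
  induction s with
  | nil => intro _ B run p hrb _; exact ⟨le_refl _, by simp, Or.inl rfl⟩
  | cons t ts ih =>
    intro hpair B run p hrb hlow
    have hhead : ∀ x ∈ ts, t ≤ x := (List.pairwise_cons.mp hpair).1
    have hpair' : ts.Pairwise (· ≤ ·) := (List.pairwise_cons.mp hpair).2
    set run' : Int := if (p == some t) = true then run + 1 else 1 with hrun'
    set B' : Int := if B < run' then run' else B with hB'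
    have hre : p = some t → run' = run + 1 := by intro hp; rw [hrun', if_pos (by simp [hp])]
    have hrn : p ≠ some t → run' = 1 := by intro hp; rw [hrun', if_neg (by simp [hp])]
    have hstep : (t :: ts).foldl pvRStep (B, run, p) = ts.foldl pvRStep (B', run', some t) := by
      rw [hB', hrun']; simp only [List.foldl_cons, pvRStep]
    have hrb' : run' ≤ B' := by rw [hB']; split <;> omega
    have hBB' : B ≤ B' := by rw [hB']; split <;> omega
    obtain ⟨ihB, ihub, ihcase⟩ := ih hpair' B' run' (some t) hrb'
      (by intro a ha x hx; cases ha; exact hhead x hx)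
    clear ih hrb hpair
    rw [hstep]
    clear hstep
    generalize (ts.foldl pvRStep (B', run', some t)).1 = r at ihB ihub ihcase ⊢
    have hub_t : t ∈ ts → run' + (ts.count t : Int) ≤ r := by
      intro htts; have := ihub t htts; simpa using this
    have hpu : ∀ u ∈ ts, u ≠ t → p ≠ some u := by
      intro u hu hut hp
      have h1 : u ≤ t := hlow u hp t (List.mem_cons_self ..)
      have h2 : t ≤ u := hhead u hu
      exact hut (le_antisymm h1 h2)
    have hval_t : (if p = some t then run else 0) + 1 = run' := by
      by_cases hp : p = some t
      · rw [if_pos hp, hre hp]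
      · rw [if_neg hp, hrn hp]; omega
    have hcc : ∀ u : String, u ≠ t → (t :: ts).count u = ts.count u := by
      intro u hut; simp [Ne.symm hut]
    refine ⟨le_trans hBB' ihB, ?_, ?_⟩
    · intro u hu
      rcases List.mem_cons.mp hu with h | hu'
      · subst h
        rw [List.count_cons_self]
        push_cast
        by_cases htts : u ∈ ts
        · have := hub_t htts; omega
        · have hc0 : ts.count u = 0 := List.count_eq_zero.mpr htts
          have := le_trans hrb' ihB
          rw [hc0]; omega
      · by_cases hut : u = t
        · subst hut
          rw [List.count_cons_self]
          push_cast
          have := hub_t hu'; omega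
        · rw [if_neg (hpu u hu' hut), hcc u hut]
          have := ihub u hu'
          rw [if_neg (by simp; exact fun h => hut h.symm)] at this
          omega
    · rcases ihcase with hrB' | ⟨u, hu, hval⟩
      · by_cases hBr : B < run'
        · have hrr : r = run' := by
            rw [hrB', hB', if_pos hBr]
          right
          refine ⟨t, List.mem_cons_self .., ?_⟩
          have hc0 : ts.count t = 0 := by
            by_contra hc
            have htts : t ∈ ts := List.count_pos_iff.mp (Nat.pos_of_ne_zero hc)
            have h1 : 1 ≤ ts.count t := List.count_pos_iff.mpr htts
            have := hub_t htts
            omega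
          rw [List.count_cons_self, hc0]
          push_cast
          omega
        · left
          rw [hrB', hB', if_neg hBr]
      · by_cases hut : u = t
        · subst hut
          right
          refine ⟨u, List.mem_cons_self .., ?_⟩
          rw [if_pos rfl] at hval
          rw [List.count_cons_self]
          push_cast
          omega
        · right
          refine ⟨u, List.mem_cons_of_mem _ hu, ?_⟩
          rw [if_neg (hpu u hu hut), hcc u hut]
          rw [if_neg (by simp; exact fun h => hut h.symm)] at hval
          omega

-- A's guarded max over the counter values equals B's longest run of the sorted flat list
theorem pv_max_eq (flat : List String) :
    (if 1 ≤ PySem.Dict.size (PySem.Dict.counter flat) then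
        (PySem.List.max? (PySem.Dict.values (PySem.Dict.counter flat)) (fun x => x)).getD 0
      else 0)
    = pvLongestRun (PySem.List.sorted flat (fun x => x) false) := by
  rcases eq_or_ne flat [] with rfl | hne
  · rfl
  · have hperm : (PySem.List.sorted flat (fun x => x) false).Perm flat :=
      PySem.List.sorted_perm ..
    have hpair : (PySem.List.sorted flat (fun x => x) false).Pairwise (· ≤ ·) := by
      simpa using PySem.List.sorted_pairwise (xs := flat) (key := fun x => x)
    obtain ⟨h0, hub, hcase⟩ := pv_run_spec _ hpair 0 0 none le_rfl
      (by intro a ha x hx; cases ha)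
    set s := PySem.List.sorted flat (fun x => x) false with hs
    have hLR : pvLongestRun s = (s.foldl pvRStep (0, 0, none)).1 := rfl
    rw [← hLR] at h0 hub hcase
    have hub' : ∀ t ∈ flat, (flat.count t : Int) ≤ pvLongestRun s := by
      intro t ht
      have := hub t (hperm.mem_iff.mpr ht)
      simpa [hperm.count_eq t] using this
    have hsz : PySem.Dict.size (PySem.Dict.counter flat) = (PySem.Set.ofList flat).length := by
      simp only [PySem.Dict.size, PySem.Dict.items_counter, List.length_map]
    have hof : PySem.Set.ofList flat ≠ [] := by
      obtain ⟨x, hx⟩ := List.exists_mem_of_ne_nil flat hne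
      intro h
      have : x ∈ PySem.Set.ofList flat := (PySem.Set.mem_ofList _ _).mpr hx
      simp [h] at this
    have hsz1 : 1 ≤ PySem.Dict.size (PySem.Dict.counter flat) := by
      rw [hsz]
      cases h : PySem.Set.ofList flat with
      | nil => exact absurd h hof
      | cons a l => simp
    rw [if_pos hsz1, pv_values_counter]
    obtain ⟨m, hm⟩ : ∃ m, PySem.List.max? ((PySem.Set.ofList flat).map (fun t => (flat.count t : Int))) (fun x => x) = some m := by
      cases h : PySem.List.max? ((PySem.Set.ofList flat).map (fun t => (flat.count t : Int))) (fun x => x) with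
      | none =>
        exfalso
        have := (PySem.List.max?_eq_none_iff _ _).mp h
        rw [List.map_eq_nil_iff] at this
        exact hof this
      | some m => exact ⟨m, rfl⟩
    rw [hm, Option.getD_some]
    obtain ⟨t0, ht0, ht0e⟩ := List.mem_map.mp (PySem.List.max?_mem hm)
    have hmax := PySem.List.max?_isMax hm
    have h1 : m ≤ pvLongestRun s := by
      have := hub' t0 ((PySem.Set.mem_ofList _ _).mp ht0)
      omega
    have h2 : pvLongestRun s ≤ m := by
      rcases hcase with hz | ⟨t1, ht1, hv⟩
      · obtain ⟨x, hx⟩ := List.exists_mem_of_ne_nil flat hne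
        have hle := hub' x hx
        have hcx : 1 ≤ flat.count x := List.count_pos_iff.mpr hx
        omega
      · have ht1f : t1 ∈ flat := hperm.mem_iff.mp ht1
        have hmm : (flat.count t1 : Int) ∈ (PySem.Set.ofList flat).map (fun t => (flat.count t : Int)) :=
          List.mem_map_of_mem ((PySem.Set.mem_ofList _ _).mpr ht1f)
        have := hmax _ hmm
        have hv' : pvLongestRun s = (flat.count t1 : Int) := by
          simpa [hperm.count_eq t1] using hv
        omega
    omega

-- abbreviation used only in the equivalence proof: the keys contributed by one contig
def pvK (H : PySem.Dict String (List (String × Int))) (c : String × String) : List String :=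
  (PySem.Dict.mk (H.getD c.1 [])).keys

theorem tally_contig_hits_spec_aux (contigs : List (String × String))
    (hits : List (String × List (String × Int))) :
    tally_contig_hits contigs hits = tally_contig_hits_alt contigs hits := by
  simp only [tally_contig_hits, tally_contig_hits_alt]
  set H : PySem.Dict String (List (String × Int)) := PySem.Dict.mk hits with hH
  -- A's loop in if-form
  have hstepA : contigs.foldl (fun st c =>
      match H.get? c.1 with
      | none => st
      | some d =>
        let ks := (PySem.Dict.mk d).keys
        let ont := PySem.Set.union st.1 (PySem.Set.ofList ks)
        let sup := ks.foldl (fun sup s =>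
          match PySem.Dict.get? sup s with
          | none => PySem.Dict.insert sup s (1 : Int)
          | some v => PySem.Dict.insert sup s (v + 1)) st.2.1
        (ont, sup, st.2.2 + 1)) ((PySem.Set.empty : PySem.Set String), (PySem.Dict.empty : PySem.Dict String Int), (0 : Int))
      = contigs.foldl (fun st c =>
        if (H.get? c.1).isSome then
          (PySem.Set.update st.1 (pvK H c), (pvK H c).foldl pvCStep st.2.1, st.2.2 + 1)
        else st) ((PySem.Set.empty : PySem.Set String), (PySem.Dict.empty : PySem.Dict String Int), (0 : Int)) := by
    apply PySem.List.foldl_congr_mem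
    intro acc c _
    cases h : H.get? c.1 with
    | none => rfl
    | some d =>
      have hk : pvK H c = (PySem.Dict.mk d).keys := by
        simp only [pvK, PySem.Dict.getD_eq_get?_getD, h, Option.getD_some]
      simp only [Option.isSome_some, if_pos]
      rw [pv_inner_counter, pv_union_ofList, hk]
  -- B's loop in if-form
  have hstepB : contigs.foldl (fun st c =>
      match H.get? c.1 with
      | none => st
      | some d => (st.1 + 1, st.2 ++ (PySem.Dict.mk d).keys)) ((0 : Int), ([] : List String))
      = contigs.foldl (fun st c =>
        if (H.get? c.1).isSome then (st.1 + 1, st.2 ++ pvK H c) else st) ((0 : Int), ([] : List String)) := by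
    apply PySem.List.foldl_congr_mem
    intro acc c _
    cases h : H.get? c.1 with
    | none => rfl
    | some d =>
      have hk : pvK H c = (PySem.Dict.mk d).keys := by
        simp only [pvK, PySem.Dict.getD_eq_get?_getD, h, Option.getD_some]
      simp only [Option.isSome_some, if_pos]
      rw [hk]
  rw [hstepA, hstepB]
  rw [PySem.List.foldl_if_eq_foldl_filter, PySem.List.foldl_if_eq_foldl_filter]
  set aligned := contigs.filter (fun c => (H.get? c.1).isSome) with hal
  rw [PySem.List.foldl_prod_mk (f := fun s c => PySem.Set.update s (pvK H c))
      (g := fun (p : PySem.Dict String Int × Int) c => ((pvK H c).foldl pvCStep p.1, p.2 + 1))]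
  rw [PySem.List.foldl_prod_mk (f := fun d c => (pvK H c).foldl pvCStep d)
      (g := fun (n : Int) _ => n + 1)]
  rw [PySem.List.foldl_prod_mk (f := fun (n : Int) (_ : String × String) => n + 1)
      (g := fun (l : List String) c => l ++ pvK H c)]
  set flat := aligned.flatMap (pvK H) with hflat
  rw [pv_foldl_update, pv_foldl_flat, pv_foldl_len,
    PySem.List.foldl_append_eq_flatMap, List.nil_append]
  have hcounter : flat.foldl pvCStep PySem.Dict.empty = PySem.Dict.counter flat := by
    simpa [pvCStep] using PySem.Dict.foldl_insert_getD_add_one_eq_counter (xs := flat)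
  have hset : PySem.Set.update PySem.Set.empty flat = PySem.Set.ofList flat :=
    PySem.Set.update_nil_left flat
  simp [← hflat]
  exact ⟨PySem.Set.update_nil_left flat, by rw [hcounter]; exact pv_max_eq flat⟩

-- ===== VERDICT =====
theorem tally_contig_hits_spec : Claim_equal_tally_contig_hits := by
  intro contigs hits _
  unfold Spec_tally_contig_hits
  exact tally_contig_hits_spec_aux contigs hits
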